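-- pv_equiv track=rewrite | github.com/harshitgupta028/TCS-Xplore-Python | Vowel-String-Simple/Solution.py | vowelString
-- ===== SOURCE A (Python) =====
-- def vowelString(lis):
--     st = 'aeiou'
--     vowel_lis = []
--     for str in lis:
--         count = 0
--         for let in str:
--             if let in st:
--                 count = count + 1
--         if count <= 1:
--             vowel_lis.append(str)
--     return vowel_lis
-- ===== SOURCE B (Python) =====
-- def vowelString(lis):
--     return [s for s in lis if sum(s.count(v) for v in 'aeiou') <= 1]
-- ===== Notes on version B (the rewrite author's own statement) =====
-- stated objective: idiomatic
-- what changed: Replaces the explicit accumulator loops (inner per-character membership count, outer append loop) by a single list comprehension whose vowel count is sum(s.count(v) for v in 'aeiou'), i.e. five str.count scans instead of one membership loop.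
import Mathlib
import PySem

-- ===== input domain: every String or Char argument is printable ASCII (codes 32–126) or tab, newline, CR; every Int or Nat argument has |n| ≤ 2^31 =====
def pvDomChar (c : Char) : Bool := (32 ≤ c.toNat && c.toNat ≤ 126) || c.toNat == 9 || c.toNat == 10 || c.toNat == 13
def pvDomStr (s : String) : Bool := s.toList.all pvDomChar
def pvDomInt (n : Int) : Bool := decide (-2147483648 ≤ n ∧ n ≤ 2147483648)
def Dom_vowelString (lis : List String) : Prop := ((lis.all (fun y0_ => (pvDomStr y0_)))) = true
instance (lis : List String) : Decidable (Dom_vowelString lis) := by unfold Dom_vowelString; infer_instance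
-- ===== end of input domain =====

-- B replaces A's explicit accumulator loops by a list comprehension counting vowels
-- via five str.count scans (idiomatic; same return value).

-- ===== PORT A =====
def vowelString (lis : List String) : List String :=
  lis.foldl (fun vowel_lis str =>
    let count : Int :=
      str.toList.foldl (fun count let_ =>
        if ("aeiou".toList.contains let_) then count + 1 else count) 0
    if count ≤ 1 then vowel_lis ++ [str] else vowel_lis) []

-- ===== PORT B =====
def vowelString_alt (lis : List String) : List String :=
  lis.filter (fun s =>
    decide (("aeiou".toList.map (fun v => PySem.Str.count s (String.ofList [v]))).sum ≤ 1))

-- ===== PRECONDITION & SPEC =====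
def Spec_vowelString (lis : List String) (out : List String) : Prop := out = vowelString_alt lis
instance (lis : List String) (out : List String) : Decidable (Spec_vowelString lis out) := by unfold Spec_vowelString; infer_instance

-- ===== CLAIM (what is proved, stated in full; the proofs are below) =====
def Claim_equal_vowelString : Prop := ∀ (lis : List String), Dom_vowelString lis → Spec_vowelString lis (vowelString lis)

-- ===== LEMMAS AND PROOFS =====

-- a single-character substring count is the character count
theorem pvCountGoSing (c : Char) (t : List Char) (fuel acc : Nat) (h : t.length ≤ fuel) :
    PySem.Chars.count.go [c] fuel t acc = acc + t.count c := by
  induction fuel generalizing t acc with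
  | zero => cases t with
    | nil => simp [PySem.Chars.count.go]
    | cons a b => simp at h
  | succ n ih =>
    cases t with
    | nil => simp [PySem.Chars.count.go]
    | cons hd tl =>
      have hlen : tl.length ≤ n := by simpa using h
      simp only [PySem.Chars.count.go, List.isPrefixOf, List.count_cons, List.length_cons,
        List.drop_succ_cons]
      by_cases hc : c = hd
      · subst hc
        simp [ih tl _ hlen]
        omega
      · have hb : (c == hd) = false := by simp [hc]
        simp [hb, Ne.symm hc, ih tl _ hlen]

theorem pvCountSing (s : List Char) (c : Char) : PySem.Chars.count s [c] = s.count c := by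
  simp only [PySem.Chars.count, List.isEmpty_cons, if_false, Bool.false_eq_true]
  simpa using pvCountGoSing c s s.length 0 le_rfl

-- membership count equals the sum of the five per-vowel counts
theorem pvVowelSplit (s : List Char) :
    s.countP (fun ch => ("aeiou".toList.contains ch)) =
      s.count 'a' + s.count 'e' + s.count 'i' + s.count 'o' + s.count 'u' := by
  induction s with
  | nil => simp
  | cons h t ih =>
    simp only [List.countP_cons, List.count_cons, ih]
    by_cases h1 : h = 'a' <;> by_cases h2 : h = 'e' <;> by_cases h3 : h = 'i' <;>
      by_cases h4 : h = 'o' <;> by_cases h5 : h = 'u' <;>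
      simp_all <;> omega

-- ===== VERDICT (by name: the statement is the Claim_ definition above) =====
theorem vowelString_spec : Claim_equal_vowelString := by
  intro lis _
  unfold Spec_vowelString vowelString vowelString_alt
  have hfold : ∀ (s : String),
      (s.toList.foldl (fun count let_ =>
        if ("aeiou".toList.contains let_) then count + 1 else count) (0 : Int)) =
      ((("aeiou".toList.map (fun v => PySem.Str.count s (String.ofList [v]))).sum : Nat) : Int) := by
    intro s
    rw [PySem.List.foldl_if_add_one, pvVowelSplit]
    have hc : ∀ v : Char, PySem.Str.count s (String.ofList [v]) = s.toList.count v := by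
      intro v
      rw [PySem.Str.count_eq]
      simp [pvCountSing]
    simp only [List.map_cons, List.map_nil, List.sum_cons, List.sum_nil, hc,
      show "aeiou".toList = ['a','e','i','o','u'] from rfl]
    push_cast
    omega
  rw [PySem.List.foldl_append_ite_eq_filter]
  simp only [List.nil_append]
  apply List.filter_congr
  intro s _
  rw [hfold]
  simp only [decide_eq_decide]
  exact_mod_cast Iff.rfl
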